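-- pv_equiv track=rewrite | github.com/iproha94/contests | ru_code/2020_qualification/a.py | f
-- ===== SOURCE A (Python) =====
-- def f(s):
--     spaces = 0
--     for i, c in enumerate(s[1:]):
--         if c == ' ':
--             spaces += 1
--         elif spaces in [0, 1]:
--             return 'unsafe'
--         else:
--             spaces = 0
--     return 'safe'
-- ===== SOURCE B (Python) =====
-- def f(s):
--     t = s[1:]
--     # a character is allowed iff it is a space, or both characters before it
--     # (within t; '\0' pads the first two positions) are spaces
--     if all(c == ' ' or (p == ' ' and q == ' ')
--            for q, p, c in zip('\0\0' + t, '\0' + t, t)):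
--         return 'safe'
--     return 'unsafe'
-- ===== Notes on version B (the rewrite author's own statement) =====
-- stated objective: alternative
-- what changed: Replaces A's stateful space-counter loop with early return by a stateless per-position check: zip t against its two shifted copies and test every character against its two predecessors with all().
import Mathlib
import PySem

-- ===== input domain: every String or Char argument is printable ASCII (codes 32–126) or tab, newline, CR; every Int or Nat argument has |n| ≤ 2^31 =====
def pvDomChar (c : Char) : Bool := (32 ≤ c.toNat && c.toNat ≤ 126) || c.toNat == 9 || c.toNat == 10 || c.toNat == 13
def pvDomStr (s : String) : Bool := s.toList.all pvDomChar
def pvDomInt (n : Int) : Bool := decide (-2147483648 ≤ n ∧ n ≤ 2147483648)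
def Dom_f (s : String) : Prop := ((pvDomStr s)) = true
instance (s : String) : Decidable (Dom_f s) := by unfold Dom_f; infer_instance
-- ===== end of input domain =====

-- B replaces A's stateful space-counter loop (with early return) by a stateless
-- per-position check against the two preceding characters; same O(n) cost.

-- ===== PORT A =====
-- the for-loop over enumerate(s[1:]) with the 'spaces' counter; early 'return unsafe'
-- is modelled by the branch returning directly (the enumerate index i is unused)
def fLoopA : List Char → Int → String
  | [], _ => "safe"
  | c :: rest, spaces =>
    if c = ' ' then fLoopA rest (spaces + 1)
    else if spaces = 0 ∨ spaces = 1 then "unsafe"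
    else fLoopA rest 0

def f (s : String) : String :=
  fLoopA (PySem.List.slice s.toList (some 1) none) 0

-- ===== PORT B =====
-- zip('\0\0' + t, '\0' + t, t) with the genexp's test, then all(...)
def fPredB (q p c : Char) : Bool := c == ' ' || (p == ' ' && q == ' ')

def f_alt (s : String) : String :=
  let t := PySem.List.slice s.toList (some 1) none
  if (List.zipWith3 fPredB ('\x00' :: '\x00' :: t) ('\x00' :: t) t).all id then
    "safe"
  else
    "unsafe"

-- ===== PRECONDITION & SPEC =====
def Spec_f (s : String) (out : String) : Prop := out = f_alt s
instance (s : String) (out : String) : Decidable (Spec_f s out) := by unfold Spec_f; infer_instance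

-- ===== CLAIM (what is proved, stated in full; the proofs are below) =====
def Claim_equal_f : Prop := ∀ (s : String), Dom_f s → Spec_f s (f s)

-- ===== LEMMAS AND PROOFS =====

-- Invariant: 'spaces' counts the run of spaces ending just before the current
-- position, and q, p are the two characters just before it ('\0' at the start).
lemma loop_eq_window (u : List Char) : ∀ (q p : Char) (spaces : Int),
    (1 ≤ spaces ↔ p = ' ') → (2 ≤ spaces ↔ (p = ' ' ∧ q = ' ')) → 0 ≤ spaces →
    fLoopA u spaces =
      (if (List.zipWith3 fPredB (q :: p :: u) (p :: u) u).all id then "safe" else "unsafe") := by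
  induction u with
  | nil => intro q p spaces _ _ _; simp [fLoopA, List.zipWith3]
  | cons c rest ih =>
    intro q p spaces h1 h2 h0
    simp only [List.zipWith3, List.all_cons, fLoopA, id]
    by_cases hc : c = ' '
    · subst hc
      rw [if_pos rfl]
      have hw : fPredB q p ' ' = true := by simp [fPredB]
      rw [ih p ' ' (spaces + 1)
            (Iff.intro (fun _ => rfl) (fun _ => by omega))
            (Iff.intro (fun h => ⟨rfl, h1.mp (by omega)⟩) (fun h => by have := h1.mpr h.2; omega))
            (by omega)]
      simp [hw]
    · rw [if_neg hc]
      by_cases hz : spaces = 0 ∨ spaces = 1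
      · rw [if_pos hz]
        have hw : fPredB q p c = false := by
          have hnpq : ¬ (p = ' ' ∧ q = ' ') := by rw [← h2]; omega
          simp only [fPredB, Bool.or_eq_false_iff, Bool.and_eq_false_iff]
          refine ⟨by simpa using hc, ?_⟩
          by_cases hp : p = ' '
          · exact Or.inr (by simpa using fun hq => hnpq ⟨hp, hq⟩)
          · exact Or.inl (by simpa using hp)
        simp [hw]
      · rw [if_neg hz]
        have hpq := h2.mp (by omega)
        have hw : fPredB q p c = true := by simp [fPredB, hpq.1, hpq.2]
        rw [ih p c 0 (by simp [hc]) (by simp [hc]) le_rfl]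
        simp [hw]

lemma hx : ('\x00' : Char) ≠ ' ' := by decide

-- ===== VERDICT (by name: the statement is the Claim_ definition above) =====
theorem f_spec : Claim_equal_f := by
  intro s _
  unfold Spec_f f f_alt
  exact loop_eq_window _ '\x00' '\x00' 0
    (Iff.intro (fun h => by omega) (fun h => absurd h hx))
    (by constructor <;> intro h <;> [omega; exact absurd h.1 hx])
    le_rfl
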